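-- pv_equiv track=rewrite | github.com/taojin1992/Courses-in-WSU | Spring-2017-class-taken-Reinforcement-Learning/RL-Object-detection-project/object_localization_env.py | check_cornerInbox
-- ===== SOURCE A (Python) =====
-- def check_cornerInbox(source_box,target_box):
-- 	boxB= source_box
-- 	boxA=target_box
-- 	corners_of_boxB=[(boxB[0],boxB[1]),(boxB[0],boxB[3]),(boxB[2],boxB[1]),(boxB[2],boxB[3])]
-- 	is_intersect =False
-- 	for corner in corners_of_boxB:
-- 		x=corner[0]
-- 		y=corner[1]
-- 		if x >= boxA[0] and x<=boxA[2] and y>=boxA[1] and y<=boxA[3]: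
-- 			is_intersect = True
-- 			break
-- 	return is_intersect
-- ===== SOURCE B (Python) =====
-- def check_cornerInbox(source_box, target_box):
--     boxB = source_box
--     boxA = target_box
--     x_ok = (boxA[0] <= boxB[0] <= boxA[2]) or (boxA[0] <= boxB[2] <= boxA[2])
--     y_ok = (boxA[1] <= boxB[1] <= boxA[3]) or (boxA[1] <= boxB[3] <= boxA[3])
--     return x_ok and y_ok
-- ===== Notes on version B (the rewrite author's own statement) =====
-- stated objective: simpler
-- what changed: Replaced the explicit corner list and break-loop by two per-axis interval-membership flags combined with AND, using that the corners are exactly {B0,B2}x{B1,B3}.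
-- outside the precondition, e.g. on check_cornerInbox((0, 0, 0, 0), (5,)): A returns False, B raises IndexError; on check_cornerInbox((9, 9, 9, 9), (5,)): A raises IndexError, B raises IndexError
import Mathlib
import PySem

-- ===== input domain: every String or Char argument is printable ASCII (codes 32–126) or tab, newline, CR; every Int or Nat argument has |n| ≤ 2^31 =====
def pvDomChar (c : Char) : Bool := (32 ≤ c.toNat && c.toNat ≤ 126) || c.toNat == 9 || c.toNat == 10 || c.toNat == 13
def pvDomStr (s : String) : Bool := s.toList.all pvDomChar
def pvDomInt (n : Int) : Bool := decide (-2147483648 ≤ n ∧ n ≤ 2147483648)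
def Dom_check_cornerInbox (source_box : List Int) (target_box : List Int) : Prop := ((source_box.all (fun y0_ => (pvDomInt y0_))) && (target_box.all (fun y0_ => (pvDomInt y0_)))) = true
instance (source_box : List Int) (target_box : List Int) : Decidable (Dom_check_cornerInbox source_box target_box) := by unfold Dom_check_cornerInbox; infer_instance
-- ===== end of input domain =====

-- B replaces A's corner list and break-loop by two per-axis interval flags combined with AND (objective: simpler).

-- ===== PORT A =====
-- the for-loop with break: true at the first corner inside boxA
def pvCornerLoopA (boxA : List Int) : List (Int × Int) → Bool
  | [] => false
  | (x, y) :: rest =>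
    match PySem.List.pyGet? boxA 0, PySem.List.pyGet? boxA 1, PySem.List.pyGet? boxA 2, PySem.List.pyGet? boxA 3 with
    | some a0, some a1, some a2, some a3 =>
      if a0 ≤ x ∧ x ≤ a2 ∧ a1 ≤ y ∧ y ≤ a3 then true
      else pvCornerLoopA boxA rest
    | _, _, _, _ => false

def check_cornerInbox (source_box : List Int) (target_box : List Int) : Bool :=
  let boxB := source_box
  let boxA := target_box
  match PySem.List.pyGet? boxB 0, PySem.List.pyGet? boxB 1, PySem.List.pyGet? boxB 2, PySem.List.pyGet? boxB 3 with
  | some b0, some b1, some b2, some b3 =>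
    let corners_of_boxB : List (Int × Int) := [(b0, b1), (b0, b3), (b2, b1), (b2, b3)]
    pvCornerLoopA boxA corners_of_boxB
  | _, _, _, _ => false

-- ===== PORT B =====
-- one chained comparison lo <= mid <= hi over possibly-missing indices, with Python's
-- short-circuit: hi is only looked up when lo <= mid holds (none = IndexError)
def pvChainB (lo : Option Int) (mid : Option Int) (hi : Unit → Option Int) : Option Bool :=
  match lo, mid with
  | some l, some m =>
    if l ≤ m then
      match hi () with
      | some h => some (decide (m ≤ h))
      | none => none
    else some false
  | _, _ => none

-- `c1 or c2` between two chains: c2 is only evaluated when c1 is false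
def pvOrElseB (c1 : Option Bool) (c2 : Unit → Option Bool) : Option Bool :=
  match c1 with
  | some true => some true
  | some false => c2 ()
  | none => none

def check_cornerInbox_alt (source_box : List Int) (target_box : List Int) : Bool :=
  let boxB := source_box
  let boxA := target_box
  let x_ok := pvOrElseB
    (pvChainB (PySem.List.pyGet? boxA 0) (PySem.List.pyGet? boxB 0) (fun _ => PySem.List.pyGet? boxA 2))
    (fun _ => pvChainB (PySem.List.pyGet? boxA 0) (PySem.List.pyGet? boxB 2) (fun _ => PySem.List.pyGet? boxA 2))
  let y_ok := pvOrElseB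
    (pvChainB (PySem.List.pyGet? boxA 1) (PySem.List.pyGet? boxB 1) (fun _ => PySem.List.pyGet? boxA 3))
    (fun _ => pvChainB (PySem.List.pyGet? boxA 1) (PySem.List.pyGet? boxB 3) (fun _ => PySem.List.pyGet? boxA 3))
  match x_ok, y_ok with
  | some x, some y => x && y
  | _, _ => false          -- unreachable inside Pre_: Python raises IndexError here

-- ===== PRECONDITION & SPEC =====
-- Pre_ requires both boxes to carry at least 4 coordinates; on shorter inputs A raises
-- IndexError (except for rare short-circuit cases where it returns False, excluded with it).
def Pre_check_cornerInbox (source_box : List Int) (target_box : List Int) : Prop :=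
  4 ≤ source_box.length ∧ 4 ≤ target_box.length
instance (source_box : List Int) (target_box : List Int) : Decidable (Pre_check_cornerInbox source_box target_box) := by unfold Pre_check_cornerInbox; infer_instance

def pvWitness_check_cornerInbox : List Int × List Int := ([1, 1, 3, 3], [0, 0, 4, 4])

def Spec_check_cornerInbox (source_box : List Int) (target_box : List Int) (out : Bool) : Prop := out = check_cornerInbox_alt source_box target_box
instance (source_box : List Int) (target_box : List Int) (out : Bool) : Decidable (Spec_check_cornerInbox source_box target_box out) := by unfold Spec_check_cornerInbox; infer_instance

-- ===== CLAIM (what is proved, stated in full; the proofs are below) =====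
def Claim_equal_check_cornerInbox : Prop := ∀ (source_box : List Int) (target_box : List Int), Dom_check_cornerInbox source_box target_box → Pre_check_cornerInbox source_box target_box → Spec_check_cornerInbox source_box target_box (check_cornerInbox source_box target_box)

-- ===== LEMMAS AND PROOFS =====
theorem pvGet_head4 (x0 x1 x2 x3 : Int) (xs : List Int) :
    PySem.List.pyGet? (x0 :: x1 :: x2 :: x3 :: xs) 0 = some x0 ∧
    PySem.List.pyGet? (x0 :: x1 :: x2 :: x3 :: xs) 1 = some x1 ∧
    PySem.List.pyGet? (x0 :: x1 :: x2 :: x3 :: xs) 2 = some x2 ∧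
    PySem.List.pyGet? (x0 :: x1 :: x2 :: x3 :: xs) 3 = some x3 := by
  refine ⟨?_, ?_, ?_, ?_⟩
  · rw [show (0 : Int) = ((0 : Nat) : Int) by norm_num, PySem.List.pyGet?_natCast]; rfl
  · rw [show (1 : Int) = ((1 : Nat) : Int) by norm_num, PySem.List.pyGet?_natCast]; rfl
  · rw [show (2 : Int) = ((2 : Nat) : Int) by norm_num, PySem.List.pyGet?_natCast]; rfl
  · rw [show (3 : Int) = ((3 : Nat) : Int) by norm_num, PySem.List.pyGet?_natCast]; rfl

theorem pvChainB_some (l m h : Int) :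
    pvChainB (some l) (some m) (fun _ => some h) = some (decide (l ≤ m) && decide (m ≤ h)) := by
  unfold pvChainB
  by_cases hl : l ≤ m <;> simp [hl]

set_option maxHeartbeats 1000000 in
theorem check_cornerInbox_eq_alt (b0 b1 b2 b3 : Int) (sr : List Int)
    (a0 a1 a2 a3 : Int) (tr : List Int) :
    check_cornerInbox (b0 :: b1 :: b2 :: b3 :: sr) (a0 :: a1 :: a2 :: a3 :: tr) =
    check_cornerInbox_alt (b0 :: b1 :: b2 :: b3 :: sr) (a0 :: a1 :: a2 :: a3 :: tr) := by
  obtain ⟨hs0, hs1, hs2, hs3⟩ := pvGet_head4 b0 b1 b2 b3 sr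
  obtain ⟨ht0, ht1, ht2, ht3⟩ := pvGet_head4 a0 a1 a2 a3 tr
  rw [Bool.eq_iff_iff]
  simp only [check_cornerInbox, check_cornerInbox_alt, pvCornerLoopA, pvOrElseB,
    hs0, hs1, hs2, hs3, ht0, ht1, ht2, ht3, pvChainB_some]
  simp only [ite_eq_iff, Bool.false_eq_true, and_false, and_true, or_false]
  cases h1 : (decide (a0 ≤ b0) && decide (b0 ≤ a2)) <;>
  cases h2 : (decide (a0 ≤ b2) && decide (b2 ≤ a2)) <;>
  cases h3 : (decide (a1 ≤ b1) && decide (b1 ≤ a3)) <;>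
  cases h4 : (decide (a1 ≤ b3) && decide (b3 ≤ a3)) <;>
    simp_all

-- ===== VERDICT (by name: the statement is the Claim_ definition above) =====
theorem check_cornerInbox_spec : Claim_equal_check_cornerInbox := by
  intro s t _ hp
  unfold Spec_check_cornerInbox
  obtain ⟨hs, ht⟩ := hp
  match s, hs, t, ht with
  | b0 :: b1 :: b2 :: b3 :: sr, _, a0 :: a1 :: a2 :: a3 :: tr, _ =>
    exact check_cornerInbox_eq_alt b0 b1 b2 b3 sr a0 a1 a2 a3 tr
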